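-- pv_equiv track=rewrite | github.com/dennlinger/hypergraph-document-store | GenerateDyadicGraph.py | explode_hyperedge
-- ===== SOURCE A (Python) =====
-- def explode_hyperedge(hyperedge, hyperedge_id):
--     """
--     Takes a hyperedge set, and generates all the dyadic connections for a similar regular edge.
--     :param hyperedge: (list) List of participating terms.
--     :param hyperedge_id: (int) Identifier for the hyperedge, used for postgres.
--     :return: (list) List of connection tuples
--     """
--
--     # We'll sort, so we have a clear idea of how many of the same edge we have, since it will always be
--     # of the form (smaller_id, larger_id).
--     hyperedge = sorted(hyperedge)
--     edge_set = []
--     postgres_set = []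
--     # essentially build connections to all "vertices after". This guarantees we don't do edges twice.
--     for i, _ in enumerate(hyperedge):
--         for j in range(i+1, len(hyperedge)):
--             edge_set.append((hyperedge[i], hyperedge[j]))
--             # postgres performs better with duplicate edges, so we manually correct this here
--             postgres_set.append((hyperedge_id, hyperedge[i], hyperedge[j]))
--             postgres_set.append((hyperedge_id, hyperedge[j], hyperedge[i]))
--
--     return edge_set, postgres_set
-- ===== SOURCE B (Python) =====
-- def explode_hyperedge(hyperedge, hyperedge_id):
--     """
--     Structural re-implementation: build edge_set by head/tail recursion over the
--     sorted list (combinations of 2), then derive postgres_set in a second pass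
--     over edge_set, keeping the (a,b)-then-(b,a) order per pair.
--     """
--     edge_set = []
--     rest = sorted(hyperedge)
--     while rest:
--         a, *rest = rest
--         edge_set.extend((a, b) for b in rest)
--     postgres_set = [t for (a, b) in edge_set
--                       for t in ((hyperedge_id, a, b), (hyperedge_id, b, a))]
--     return edge_set, postgres_set
-- ===== Notes on version B (the rewrite author's own statement) =====
-- stated objective: simpler
-- what changed: Replaces the fused double index loop with a head/tail recursion over the sorted list that builds edge_set alone, plus a second derived pass that expands each edge into its two postgres tuples.
import Mathlib
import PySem

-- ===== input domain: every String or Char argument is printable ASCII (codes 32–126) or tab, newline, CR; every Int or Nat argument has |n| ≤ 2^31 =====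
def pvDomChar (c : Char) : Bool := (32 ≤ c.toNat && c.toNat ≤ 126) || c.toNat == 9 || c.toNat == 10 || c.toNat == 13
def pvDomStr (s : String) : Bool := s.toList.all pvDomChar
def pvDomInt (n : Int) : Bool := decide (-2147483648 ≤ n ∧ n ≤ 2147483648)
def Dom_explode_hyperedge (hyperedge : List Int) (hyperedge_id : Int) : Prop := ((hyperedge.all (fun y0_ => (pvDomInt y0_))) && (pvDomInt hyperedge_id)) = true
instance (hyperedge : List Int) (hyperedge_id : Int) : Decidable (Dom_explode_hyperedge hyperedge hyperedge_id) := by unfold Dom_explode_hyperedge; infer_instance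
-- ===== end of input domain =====

-- B replaces A's fused double index loop with a structural combinations pass
-- followed by a derived pass over edge_set (objective: simpler decomposition).

-- ===== PORT A =====
-- A: sort; for i,_ in enumerate: for j in range(i+1, len): append to both lists.
def explode_hyperedge (hyperedge : List Int) (hyperedge_id : Int) : (List (Int × Int)) × (List (Int × Int × Int)) :=
  let hs := PySem.List.sorted hyperedge (fun x => x) false
  (PySem.List.enumerate hs 0).foldl
    (fun acc p =>
      (PySem.List.pyRange (p.1 + 1) (PySem.List.len hs) 1).foldl
        (fun acc2 j =>
          (acc2.1 ++ [(PySem.List.pyGetD hs p.1 0, PySem.List.pyGetD hs j 0)],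
           acc2.2 ++ [(hyperedge_id, PySem.List.pyGetD hs p.1 0, PySem.List.pyGetD hs j 0),
                      (hyperedge_id, PySem.List.pyGetD hs j 0, PySem.List.pyGetD hs p.1 0)]))
        acc)
    ([], [])

-- ===== PORT B =====
-- B's while loop: pop the head, pair it with every remaining element (combinations of 2).
def pvCombs2 : List Int → List (Int × Int)
  | [] => []
  | a :: rest => rest.map (fun b => (a, b)) ++ pvCombs2 rest

def explode_hyperedge_alt (hyperedge : List Int) (hyperedge_id : Int) : (List (Int × Int)) × (List (Int × Int × Int)) :=
  let edge_set := pvCombs2 (PySem.List.sorted hyperedge (fun x => x) false)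
  (edge_set,
   edge_set.flatMap (fun p => [(hyperedge_id, p.1, p.2), (hyperedge_id, p.2, p.1)]))

-- ===== PRECONDITION & SPEC =====
def Spec_explode_hyperedge (hyperedge : List Int) (hyperedge_id : Int) (out : (List (Int × Int)) × (List (Int × Int × Int))) : Prop := out = explode_hyperedge_alt hyperedge hyperedge_id
instance (hyperedge : List Int) (hyperedge_id : Int) (out : (List (Int × Int)) × (List (Int × Int × Int))) : Decidable (Spec_explode_hyperedge hyperedge hyperedge_id out) := by unfold Spec_explode_hyperedge; infer_instance

-- ===== CLAIM (what is proved, stated in full; the proofs are below) =====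
def Claim_equal_explode_hyperedge : Prop := ∀ (hyperedge : List Int) (hyperedge_id : Int), Dom_explode_hyperedge hyperedge hyperedge_id → Spec_explode_hyperedge hyperedge hyperedge_id (explode_hyperedge hyperedge hyperedge_id)

-- ===== LEMMAS AND PROOFS =====

-- A's inner loop over j, once the index fold is turned into a fold over the dropped suffix.
theorem pvInnerFold (l : List Int) (xi id : Int)
    (acc : (List (Int × Int)) × (List (Int × Int × Int))) :
    l.foldl (fun acc2 b => (acc2.1 ++ [(xi, b)], acc2.2 ++ [(id, xi, b), (id, b, xi)])) acc
      = (acc.1 ++ l.map (fun b => (xi, b)),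
         acc.2 ++ l.flatMap (fun b => [(id, xi, b), (id, b, xi)])) := by
  induction l generalizing acc with
  | nil => simp
  | cons b t ih => simp [List.foldl_cons, ih]

-- A's outer loop over the suffix l of hs = pre ++ l, with the enumerate index starting at pre.length.
theorem pvOuterFold (id : Int) (l : List Int) : ∀ (pre : List Int)
    (acc : (List (Int × Int)) × (List (Int × Int × Int))),
    (PySem.List.enumerate l (pre.length : Int)).foldl
      (fun acc p =>
        (PySem.List.pyRange (p.1 + 1) (PySem.List.len (pre ++ l)) 1).foldl
          (fun acc2 j =>
            (acc2.1 ++ [(PySem.List.pyGetD (pre ++ l) p.1 0, PySem.List.pyGetD (pre ++ l) j 0)],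
             acc2.2 ++ [(id, PySem.List.pyGetD (pre ++ l) p.1 0, PySem.List.pyGetD (pre ++ l) j 0),
                        (id, PySem.List.pyGetD (pre ++ l) j 0, PySem.List.pyGetD (pre ++ l) p.1 0)]))
          acc)
      acc
    = (acc.1 ++ pvCombs2 l,
       acc.2 ++ (pvCombs2 l).flatMap (fun p => [(id, p.1, p.2), (id, p.2, p.1)])) := by
  induction l with
  | nil => intro pre acc; simp [PySem.List.enumerate, pvCombs2]
  | cons x xs ih =>
    intro pre acc
    rw [PySem.List.enumerate_cons, List.foldl_cons]
    have hx : PySem.List.pyGetD (pre ++ x :: xs) (pre.length : Int) 0 = x := by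
      simp [PySem.List.pyGetD_natCast, List.getD]
    have hdrop : (pre ++ x :: xs).drop ((pre.length : Int) + 1).toNat = xs := by
      have h1 : ((pre.length : Int) + 1).toNat = pre.length + 1 := by omega
      rw [h1, show pre.length + 1 = (pre ++ [x]).length by simp,
          show pre ++ x :: xs = (pre ++ [x]) ++ xs by simp]
      exact List.drop_left
    have hin := PySem.List.foldl_pyRange_pyGetD (pre ++ x :: xs) 0
      (fun acc2 b => (acc2.1 ++ [(x, b)], acc2.2 ++ [(id, x, b), (id, b, x)])) acc
      (a := (pre.length : Int) + 1) (by positivity)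
    simp only [] at hin ⊢
    rw [hx, hin, hdrop, pvInnerFold]
    rw [show (pre.length : Int) + 1 = ((pre ++ [x]).length : Int) by simp,
        show pre ++ x :: xs = (pre ++ [x]) ++ xs by simp,
        ih (pre ++ [x])]
    simp [pvCombs2, List.flatMap_append, List.flatMap_map]

-- ===== VERDICT (by name: the statement is the Claim_ definition above) =====
theorem explode_hyperedge_spec : Claim_equal_explode_hyperedge := by
  intro hyperedge hyperedge_id _
  unfold Spec_explode_hyperedge explode_hyperedge explode_hyperedge_alt
  have h := pvOuterFold hyperedge_id (PySem.List.sorted hyperedge (fun x => x) false) [] ([], [])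
  simpa using h
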